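-- pv_equiv track=rewrite | github.com/zeusm9/Chinese-Word-Segmentation | code/data.py | bigrams_vocab
-- ===== SOURCE A (Python) =====
-- import collections
--
-- def bigrams_vocab(data):
--     # Unigram vocabulary, return a bigram to id vocabulary and the reversed vocabulary
--     bigrams = []
--     for line in data:
--         for bigram in line:
--             bigrams.append(bigram)
--     count = collections.Counter(bigrams)
--
--     word_to_id = dict()
--     word_to_id["<UNK>"] = 1  # Tag <UNK> needed for OOV bigrams
--     word_to_id["<END>"] = 2  # Tag <END> needed to take the last bigram in each line
--     for bigram in count:
--         word_to_id.update({bigram: len(word_to_id) + 1})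
--     id_to_word = {v: k for k, v in word_to_id.items()}
--     return word_to_id, id_to_word
-- ===== SOURCE B (Python) =====
-- def bigrams_vocab(data):
--     # One fused pass over data with a `seen` set: no intermediate bigrams list, no Counter.
--     word_to_id = {"<UNK>": 1, "<END>": 2}
--     seen = set()
--     for line in data:
--         for bigram in line:
--             if bigram not in seen:
--                 seen.add(bigram)
--                 word_to_id[bigram] = len(word_to_id) + 1
--     id_to_word = {v: k for k, v in word_to_id.items()}
--     return word_to_id, id_to_word
-- ===== Notes on version B (the rewrite author's own statement) =====
-- stated objective: simpler
-- what changed: B fuses A's three passes (flatten into a bigrams list, build a Counter, iterate its keys) into ONE nested loop over data maintaining a `seen` set, assigning ids at first occurrence; the Counter and the intermediate list disappear.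
import Mathlib
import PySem

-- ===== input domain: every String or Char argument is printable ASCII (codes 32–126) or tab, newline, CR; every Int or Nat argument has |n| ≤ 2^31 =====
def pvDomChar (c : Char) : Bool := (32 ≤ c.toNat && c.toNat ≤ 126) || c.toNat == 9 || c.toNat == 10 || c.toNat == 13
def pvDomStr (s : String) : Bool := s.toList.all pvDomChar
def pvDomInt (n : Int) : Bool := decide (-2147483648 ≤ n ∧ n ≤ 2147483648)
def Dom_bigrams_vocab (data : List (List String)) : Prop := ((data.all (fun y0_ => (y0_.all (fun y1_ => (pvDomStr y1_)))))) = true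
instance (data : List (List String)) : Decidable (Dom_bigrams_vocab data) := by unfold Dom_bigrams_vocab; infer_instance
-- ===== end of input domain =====

-- B fuses A's flatten/Counter/iterate-keys passes into one nested loop with a `seen` set (objective: simpler); return values proved equal.


-- ===== PORT A =====
-- literal port of A: build the flat bigrams list, Counter it, seed the tag dict,
-- then iterate the counter's keys inserting id = len(word_to_id) + 1; finally invert.
def bigrams_vocab (data : List (List String)) : (List (String × Int)) × (List (Int × String)) :=
  let bigrams : List String :=
    data.foldl (fun acc line => line.foldl (fun acc b => acc ++ [b]) acc) []
  let count : PySem.Dict String Int := PySem.Dict.counter bigrams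
  let word_to_id0 : PySem.Dict String Int :=
    ((PySem.Dict.empty).insert "<UNK>" 1).insert "<END>" 2
  let word_to_id :=
    count.keys.foldl (fun d b => d.insert b ((d.size : Int) + 1)) word_to_id0
  let id_to_word : PySem.Dict Int String :=
    word_to_id.items.foldl (fun d kv => d.insert kv.2 kv.1) PySem.Dict.empty
  (word_to_id.items, id_to_word.items)

-- ===== PORT B =====
-- literal port of B: one nested loop over data carrying (word_to_id, seen); invert at the end.
def bigramStepB (st : PySem.Dict String Int × PySem.Set String) (b : String) :
    PySem.Dict String Int × PySem.Set String :=
  if st.2.contains b then st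
  else (st.1.insert b ((st.1.size : Int) + 1), PySem.Set.add st.2 b)

def bigrams_vocab_alt (data : List (List String)) : (List (String × Int)) × (List (Int × String)) :=
  let init : PySem.Dict String Int × PySem.Set String :=
    (((PySem.Dict.empty).insert "<UNK>" 1).insert "<END>" 2, PySem.Set.empty)
  let st := data.foldl (fun st line => line.foldl bigramStepB st) init
  let id_to_word : PySem.Dict Int String :=
    st.1.items.foldl (fun d kv => d.insert kv.2 kv.1) PySem.Dict.empty
  (st.1.items, id_to_word.items)

-- ===== PRECONDITION & SPEC =====
def Spec_bigrams_vocab (data : List (List String)) (out : (List (String × Int)) × (List (Int × String))) : Prop := out = bigrams_vocab_alt data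
instance (data : List (List String)) (out : (List (String × Int)) × (List (Int × String))) : Decidable (Spec_bigrams_vocab data out) := by unfold Spec_bigrams_vocab; infer_instance

-- ===== CLAIM (what is proved, stated in full; the proofs are below) =====
def Claim_equal_bigrams_vocab : Prop := ∀ (data : List (List String)), Dom_bigrams_vocab data → Spec_bigrams_vocab data (bigrams_vocab data)

-- ===== LEMMAS AND PROOFS =====

-- A's append-loop flattening equals List.flatten
theorem pv_flatten_eq (data : List (List String)) :
    data.foldl (fun acc line => line.foldl (fun acc b => acc ++ [b]) acc) [] = data.flatten := by
  have h : (fun (acc line : List String) => line.foldl (fun acc b => acc ++ [b]) acc)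
      = fun acc line => acc ++ line := by
    funext acc line; exact PySem.List.foldl_append_singleton line acc
  rw [h]
  simpa using PySem.List.foldl_append_eq_flatten data []

-- the new (unseen) elements of l relative to seen-set s, in first-occurrence order
def pvNew (s : PySem.Set String) : List String → List String
  | [] => []
  | b :: l => if s.contains b then pvNew s l else b :: pvNew (PySem.Set.add s b) l

-- B's fused loop = fold the dict-update only over the new elements
theorem pv_foldB (l : List String) : ∀ (d : PySem.Dict String Int) (s : PySem.Set String),
    l.foldl bigramStepB (d, s) =
      ((pvNew s l).foldl (fun d b => d.insert b ((d.size : Int) + 1)) d, l.foldl PySem.Set.add s) := by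
  induction l with
  | nil => intro d s; simp [pvNew]
  | cons b l ih =>
    intro d s
    by_cases h : b ∈ s
    · simp [pvNew, bigramStepB, PySem.Set.add, PySem.Set.contains, h, ih]
    · simp [pvNew, bigramStepB, PySem.Set.add, PySem.Set.contains, h, ih]

-- relative to any seen-set s, s ++ the new elements is the updated seen-set
theorem pv_new_ofList (l : List String) : ∀ (s : PySem.Set String),
    s ++ pvNew s l = l.foldl PySem.Set.add s := by
  induction l with
  | nil => intro s; simp [pvNew]
  | cons b l ih =>
    intro s
    by_cases h : b ∈ s
    · simp [pvNew, PySem.Set.add, PySem.Set.contains, h, ih]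
    · rw [List.foldl_cons, show PySem.Set.add s b = s ++ [b] from by
        simp [PySem.Set.add, PySem.Set.contains, h], ← ih (s ++ [b])]
      simp [pvNew, PySem.Set.contains, h]

-- ===== VERDICT (by name: the statement is the Claim_ definition above) =====
theorem bigrams_vocab_spec : Claim_equal_bigrams_vocab := by
  intro data _
  show bigrams_vocab data = bigrams_vocab_alt data
  simp only [bigrams_vocab, bigrams_vocab_alt]
  rw [pv_flatten_eq, ← List.foldl_flatten, pv_foldB]
  have hkeys : (PySem.Dict.counter data.flatten).keys = PySem.Set.ofList data.flatten :=
    PySem.Dict.keys_counter _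
  have hnew : pvNew PySem.Set.empty data.flatten = PySem.Set.ofList data.flatten := by
    have := pv_new_ofList data.flatten PySem.Set.empty
    simpa [PySem.Set.empty, PySem.Set.ofList_eq_foldl] using this
  rw [hkeys, hnew]
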